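-- pv_equiv track=rewrite | github.com/Tehedor/Cifrado-Cesar-Vigenere-Transposici-n-Simple | viegenere/1_length_key_ci.py | dividir_mensaje_longitud_key
-- ===== SOURCE A (Python) =====
-- def dividir_mensaje_longitud_key(message, n_parts):
--     if n_parts < 2:
--         return [message]  # No se puede dividir en menos de 2 partes
--
--     parts = ["" for _ in range(n_parts)]
--
--     for i in range(len(message)):
--         part_index = i % n_parts
--         parts[part_index] += message[i]
--     return parts
-- ===== SOURCE B (Python) =====
-- def dividir_mensaje_longitud_key(message, n_parts):
--     if n_parts < 2:
--         return [message]
--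
--     # Chunk the message into rows of length n_parts, then transpose:
--     # part i is the i-th column of the rows.
--     rows = []
--     rest = message
--     while rest:
--         rows.append(rest[:n_parts])
--         rest = rest[n_parts:]
--     return ["".join(row[i] for row in rows if i < len(row)) for i in range(n_parts)]
-- ===== Notes on version B (the rewrite author's own statement) =====
-- stated objective: alternative
-- what changed: Replaced the per-character scatter loop (appending message[i] to parts[i % n_parts]) by a chunk-and-transpose gather: the message is cut into rows of length n_parts and part i is the i-th column of those rows.
import Mathlib
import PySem

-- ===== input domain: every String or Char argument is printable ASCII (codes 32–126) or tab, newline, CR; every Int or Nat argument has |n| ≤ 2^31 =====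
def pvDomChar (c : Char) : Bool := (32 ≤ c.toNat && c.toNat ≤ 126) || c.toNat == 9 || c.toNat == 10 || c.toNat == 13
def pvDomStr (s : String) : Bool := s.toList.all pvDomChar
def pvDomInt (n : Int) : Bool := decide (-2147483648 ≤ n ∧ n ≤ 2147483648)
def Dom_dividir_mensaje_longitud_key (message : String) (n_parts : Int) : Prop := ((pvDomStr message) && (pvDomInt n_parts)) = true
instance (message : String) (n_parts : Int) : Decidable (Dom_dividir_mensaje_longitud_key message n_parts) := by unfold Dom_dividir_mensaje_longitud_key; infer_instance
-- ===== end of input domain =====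

-- B rebuilds the round-robin split by chunk-and-transpose (rows of length n_parts, part i =
-- i-th column) instead of A's per-character scatter into parts[i % n_parts]; same cost ("alternative").

-- ===== PORT A =====
-- parts[part_index] += message[i]: both indexings are always in range in A
-- (0 ≤ part_index < n_parts = len(parts), 0 ≤ i < len(message)), so .set/.getD/.toList are exact here.
def dividir_mensaje_longitud_key (message : String) (n_parts : Int) : List String :=
  if n_parts < 2 then [message]
  else
    let parts := (PySem.List.pyRange 0 n_parts 1).map (fun _ => "")
    (PySem.List.pyRange 0 (PySem.Str.len message) 1).foldl
      (fun parts i =>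
        let part_index := PySem.Int.mod i n_parts
        parts.set part_index.toNat
          (parts.getD part_index.toNat "" ++ String.ofList (PySem.Str.pyGet? message i).toList))
      parts

-- ===== PORT B =====
-- Source B's while-loop gathering rows of length n (n = n_parts ≥ 2 whenever called; the 0-case is unreachable).
def pvChunks : Nat → List Char → List (List Char)
  | _, [] => []
  | 0, l => [l]
  | n+1, c :: t => (c :: t).take (n+1) :: pvChunks (n+1) ((c :: t).drop (n+1))
termination_by _ l => l.length
decreasing_by simp

def dividir_mensaje_longitud_key_alt (message : String) (n_parts : Int) : List String :=
  if n_parts < 2 then [message]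
  else
    let rows := pvChunks n_parts.toNat message.toList
    (List.range n_parts.toNat).map
      (fun i => String.ofList (rows.filterMap (fun row => row[i]?)))

-- ===== PRECONDITION & SPEC =====
def Spec_dividir_mensaje_longitud_key (message : String) (n_parts : Int) (out : List String) : Prop := out = dividir_mensaje_longitud_key_alt message n_parts
instance (message : String) (n_parts : Int) (out : List String) : Decidable (Spec_dividir_mensaje_longitud_key message n_parts out) := by unfold Spec_dividir_mensaje_longitud_key; infer_instance

-- ===== CLAIM (what is proved, stated in full; the proofs are below) =====
def Claim_equal_dividir_mensaje_longitud_key : Prop := ∀ (message : String) (n_parts : Int), Dom_dividir_mensaje_longitud_key message n_parts → Spec_dividir_mensaje_longitud_key message n_parts (dividir_mensaje_longitud_key message n_parts)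

-- ===== LEMMAS AND PROOFS =====

def pvStep (l : List Char) (n : Nat) (P : List (List Char)) (i : Nat) : List (List Char) :=
  P.set (i % n) (P.getD (i % n) [] ++ l[i]?.toList)

theorem pvStep_length (l : List Char) (n : Nat) (P : List (List Char)) (i : Nat) :
    (pvStep l n P i).length = P.length := by simp [pvStep]

theorem pvFoldl_length (l : List Char) (n : Nat) (idxs : List Nat) (P : List (List Char)) :
    (idxs.foldl (pvStep l n) P).length = P.length := by
  induction idxs generalizing P with
  | nil => rfl
  | cons i t ih => simp [List.foldl_cons, ih, pvStep_length]

theorem pvZip_nil (n : Nat) (P : List (List Char)) (hP : P.length = n) :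
    List.zipWith (· ++ ·) P (List.replicate n ([] : List Char)) = P := by
  apply List.ext_getElem
  · simp [hP]
  · intro k h1 h2
    simp [hP]

theorem pvZip_step (l : List Char) (n i : Nat) (P X : List (List Char))
    (hP : P.length = n) (hX : X.length = n) :
    List.zipWith (· ++ ·) (pvStep l n P i) X =
      List.zipWith (· ++ ·) P (List.zipWith (· ++ ·) (pvStep l n (List.replicate n ([] : List Char)) i) X) := by
  apply List.ext_getElem
  · simp [pvStep, hP, hX]
  · intro k h1 h2
    simp only [List.length_zipWith, pvStep_length, hP, hX] at h1
    have hk : k < n := by simpa using h1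
    simp only [pvStep, List.getElem_zipWith, List.getElem_set, List.length_replicate,
      List.getElem_replicate]
    have hin : i % n < n := Nat.mod_lt _ (by omega)
    by_cases hq : i % n = k
    · simp [hq, List.getElem?_eq_getElem (show k < P.length by omega)]
    · simp [hq]

theorem pvFoldl_zip (l : List Char) (n : Nat) (idxs : List Nat) (P : List (List Char))
    (hP : P.length = n) :
    idxs.foldl (pvStep l n) P =
      List.zipWith (· ++ ·) P (idxs.foldl (pvStep l n) (List.replicate n ([] : List Char))) := by
  induction idxs generalizing P with
  | nil => simp [pvZip_nil n P hP]
  | cons i t ih =>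
    simp only [List.foldl_cons]
    rw [ih (pvStep l n P i) (by rw [pvStep_length, hP]),
        ih (pvStep l n (List.replicate n []) i) (by rw [pvStep_length, List.length_replicate])]
    exact pvZip_step l n i P (t.foldl (pvStep l n) (List.replicate n [])) hP (by rw [pvFoldl_length, List.length_replicate])

theorem pvFoldl_shift (l : List Char) (n : Nat) (k : Nat) (P : List (List Char)) :
    ((List.range k).map (n + ·)).foldl (pvStep l n) P =
      (List.range k).foldl (pvStep (l.drop n) n) P := by
  rw [List.foldl_map]
  congr 1
  funext Q j
  simp [pvStep, Nat.add_mod_left, List.getElem?_drop]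

theorem pvFirst_aux (l : List Char) (n : Nat) (k : Nat) (hk : k ≤ n) (hkl : k ≤ l.length) :
    (List.range k).foldl (pvStep l n) (List.replicate n ([] : List Char)) =
      (List.range n).map (fun i => if i < k then l[i]?.toList else []) := by
  induction k with
  | zero =>
    apply List.ext_getElem
    · simp
    · intro i h1 h2; simp
  | succ k ih =>
    rw [List.range_succ, List.foldl_append]
    rw [ih (by omega) (by omega)]
    apply List.ext_getElem
    · simp [pvStep]
    · intro i h1 h2
      have hkn : k % n = k := Nat.mod_eq_of_lt (by omega)
      simp only [pvStep, List.foldl_cons, List.foldl_nil, hkn, List.getElem_set,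
        List.getElem_map, List.getElem_range]
      by_cases hik : k = i
      · subst hik
        rw [if_pos rfl]
        rw [List.getD_eq_getElem?_getD, List.getElem?_map]
        simp [List.getElem?_range (show k < n by omega)]
      · rw [if_neg hik]
        have : i < k ↔ i < k + 1 := by omega
        simp [this]

theorem pvMain (n : Nat) (hn : 0 < n) (l : List Char) :
    (List.range l.length).foldl (pvStep l n) (List.replicate n ([] : List Char)) =
      (List.range n).map (fun i => (pvChunks n l).filterMap (fun row => row[i]?)) := by
  cases hl : l with
  | nil => simp [pvChunks, List.map_const']
  | cons c t =>
    rw [← hl]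
    have hlen : 0 < l.length := by rw [hl]; simp
    have hsplit : List.range l.length =
        List.range (min l.length n) ++ (List.range (l.length - n)).map (n + ·) := by
      by_cases hmn : l.length ≤ n
      · have h1 : min l.length n = l.length := by omega
        have h2 : l.length - n = 0 := by omega
        simp [h1, h2]
      · have h1 : min l.length n = n := by omega
        have h2 : l.length = n + (l.length - n) := by omega
        rw [h1]
        conv_lhs => rw [h2]
        exact List.range_add
    rw [hsplit, List.foldl_append, pvFirst_aux l n (min l.length n) (by omega) (by omega),
        pvFoldl_shift,
        pvFoldl_zip _ _ _ _ (by simp)]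
    have hdl : l.length - n = (l.drop n).length := by simp
    rw [hdl, pvMain n hn (l.drop n)]
    have hchunk : pvChunks n l = l.take n :: pvChunks n (l.drop n) := by
      rw [hl]
      rcases n with _ | n'
      · omega
      · simp only [pvChunks]
    rw [hchunk]
    apply List.ext_getElem
    · simp
    · intro i h1 h2
      simp only [List.length_zipWith, List.length_map, List.length_range] at h1
      have hi : i < n := by omega
      simp only [List.getElem_zipWith, List.getElem_map, List.getElem_range,
        List.filterMap_cons]
      have htake : (l.take n)[i]? = l[i]? := by
        rw [List.getElem?_take_of_lt hi]
      by_cases him : i < l.length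
      · rw [if_pos (by omega), htake, List.getElem?_eq_getElem him]
        rfl
      · rw [if_neg (by omega), htake, List.getElem?_eq_none (by omega)]
        simp
termination_by l.length
decreasing_by simp [hl]; omega

theorem pvRange_cast (n : Int) : PySem.List.pyRange 0 n 1 = (List.range n.toNat).map Int.ofNat := by
  simp only [PySem.List.pyRange]
  norm_num
  by_cases h : 0 < n
  · simp [h]
  · have h0 : n.toNat = 0 := by omega
    simp [h, h0]

theorem pvBridgeA (s : String) (n : Nat) (hn : 0 < n) (idxs : List Nat)
    (P : List (List Char)) (hP : P.length = n) (np : Int) (hnp : np = (n : Int)) :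
    (idxs.map (Int.ofNat)).foldl
      (fun parts i =>
        parts.set (PySem.Int.mod i np).toNat
          (parts.getD (PySem.Int.mod i np).toNat "" ++
            String.ofList (PySem.Str.pyGet? s i).toList))
      (P.map String.ofList) =
      (idxs.foldl (pvStep s.toList n) P).map String.ofList := by
  induction idxs generalizing P with
  | nil => rfl
  | cons i t ih =>
    simp only [List.map_cons, List.foldl_cons]
    have hmod : (PySem.Int.mod (Int.ofNat i) np).toNat = i % n := by
      subst hnp
      simp only [PySem.Int.mod]
      rw [Int.fmod_eq_emod, if_pos (Or.inl (by positivity))]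
      simp only [Int.ofNat_eq_natCast, add_zero]
      omega
    have hget : PySem.Str.pyGet? s (Int.ofNat i) = s.toList[i]? := by
      simp [PySem.Str.pyGet?, PySem.Chars.pyGet?, PySem.List.pyGet?_natCast]
    have hq : i % n < P.length := by rw [hP]; exact Nat.mod_lt _ hn
    have hgd : (P.map String.ofList).getD (i % n) "" = String.ofList (P.getD (i % n) []) := by
      rw [List.getD_eq_getElem?_getD, List.getD_eq_getElem?_getD, List.getElem?_map,
        List.getElem?_eq_getElem hq]
      rfl
    have hstep :
        (P.map String.ofList).set (PySem.Int.mod (Int.ofNat i) np).toNat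
          ((P.map String.ofList).getD (PySem.Int.mod (Int.ofNat i) np).toNat "" ++
            String.ofList (PySem.Str.pyGet? s (Int.ofNat i)).toList) =
        (pvStep s.toList n P i).map String.ofList := by
      rw [hmod, hget, hgd, ← String.ofList_append, pvStep, List.map_set]
    rw [hstep, ih _ (by rw [pvStep_length, hP])]

-- ===== VERDICT (by name: the statement is the Claim_ definition above) =====
theorem dividir_mensaje_longitud_key_spec : Claim_equal_dividir_mensaje_longitud_key := by
  intro message n_parts _
  unfold Spec_dividir_mensaje_longitud_key
  unfold dividir_mensaje_longitud_key dividir_mensaje_longitud_key_alt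
  by_cases h : n_parts < 2
  · simp [h]
  · rw [if_neg h, if_neg h]
    set l := message.toList with hl
    set n := n_parts.toNat with hn
    have hn0 : 0 < n := by omega
    have hnp : n_parts = (n : Int) := by omega
    have hinit : (PySem.List.pyRange 0 n_parts 1).map (fun _ => ("" : String)) =
        (List.replicate n ([] : List Char)).map String.ofList := by
      rw [pvRange_cast]
      apply List.ext_getElem
      · simp [hn]
      · intro i hi1 hi2
        simp
    have hlen : PySem.Str.len message = ((l.length : Nat) : Int) := rfl
    have hrange : PySem.List.pyRange 0 (PySem.Str.len message) 1 =
        (List.range l.length).map Int.ofNat := by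
      rw [hlen, pvRange_cast]
      simp
    simp only [hinit, hrange]
    rw [pvBridgeA message n hn0 (List.range l.length) (List.replicate n []) (by simp) n_parts hnp,
        pvMain n hn0 l, List.map_map]
    rfl
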